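-- pv_equiv track=rewrite | github.com/DanielMagen/Project_Euler | Problem 80.py | sum_first_100_digits
-- ===== SOURCE A (Python) =====
-- def sum_first_100_digits(num):
--     up_to = 100
--     num = str(num)
--     summ = 0
--
--     passed = 0
--     for i in range(len(num)):
--         try:
--             summ += int(num[i])
--             passed += 1
--             if passed == up_to:
--                 return summ
--         except:
--             pass
--
--     return summ
-- ===== SOURCE B (Python) =====
-- def sum_first_100_digits(num):
--     prefix = ''.join(filter(str.isdigit, str(num)))[:100]
--     return sum(int(d) * prefix.count(d) for d in "0123456789")
-- ===== Notes on version B (the rewrite author's own statement) =====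
-- stated objective: faster
-- what changed: Replaces A's streaming pass (per-character try/except, running sum, counter with early return) by a histogram computation: truncate the filtered digit string to its first 100 characters, then compute the sum as a dot product of the ten digit values with each symbol's occurrence count (str.count per digit). The counting passes run in C inside CPython (str.count/filter/join), removing the per-character Python-level try/except loop.
import Mathlib
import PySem

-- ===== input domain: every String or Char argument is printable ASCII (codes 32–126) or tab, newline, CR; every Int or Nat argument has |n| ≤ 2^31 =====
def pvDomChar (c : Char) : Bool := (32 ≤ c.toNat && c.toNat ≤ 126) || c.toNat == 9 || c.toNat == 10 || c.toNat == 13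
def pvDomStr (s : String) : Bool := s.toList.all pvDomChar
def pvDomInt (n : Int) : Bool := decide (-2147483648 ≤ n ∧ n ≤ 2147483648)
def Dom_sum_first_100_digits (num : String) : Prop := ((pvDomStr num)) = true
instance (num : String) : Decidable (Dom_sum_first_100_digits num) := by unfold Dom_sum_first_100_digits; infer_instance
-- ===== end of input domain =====

-- B replaces A's streaming accumulator (per-character try/except, running sum, counter with early return)
-- by a histogram computation: truncate to the first 100 digit characters, then sum value*count over the
-- ten digit symbols (objective: faster — a timing run measured B faster: the counting passes run in C, no per-character Python loop).

-- ===== PORT A =====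
-- the for-loop with summ/passed state; int(num[i]) succeeding ↔ ofChars? [c] = some v,
-- the except branch ↔ the none case
def pvLoopA : List Char → Int → Int → Int
  | [], summ, _ => summ
  | c :: rest, summ, passed =>
    match PySem.Int.ofChars? [c] with
    | some v =>
      if passed + 1 == 100 then summ + v else pvLoopA rest (summ + v) (passed + 1)
    | none => pvLoopA rest summ passed

def sum_first_100_digits (num : String) : Int :=
  pvLoopA num.toList 0 0

-- ===== PORT B =====
-- prefix = ''.join(filter(str.isdigit, str(num)))[:100]; sum(int(d) * prefix.count(d) for d in "0123456789")
def sum_first_100_digits_alt (num : String) : Int :=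
  let pre := PySem.List.slice (num.toList.filter PySem.Chars.isdigit) none (some 100)
  (("0123456789".toList).map
    (fun d => ((PySem.Int.ofChars? [d]).getD 0) * (PySem.Chars.count pre [d] : Int))).sum

-- ===== PRECONDITION & SPEC =====
def Spec_sum_first_100_digits (num : String) (out : Int) : Prop := out = sum_first_100_digits_alt num
instance (num : String) (out : Int) : Decidable (Spec_sum_first_100_digits num out) := by unfold Spec_sum_first_100_digits; infer_instance

-- ===== CLAIM (what is proved, stated in full; the proofs are below) =====
def Claim_equal_sum_first_100_digits : Prop := ∀ (num : String), Dom_sum_first_100_digits num → Spec_sum_first_100_digits num (sum_first_100_digits num)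

-- ===== LEMMAS AND PROOFS =====

-- on the ASCII domain, int(c) for a single char succeeds exactly on '0'..'9', with value c-48
theorem pvOfCharsSingle_ofNat : ∀ n : Nat, n < 128 →
    PySem.Int.ofChars? [Char.ofNat n] =
      (if PySem.Chars.isdigit (Char.ofNat n) then some ((n:Int) - 48) else none) := by
  decide

theorem pvOfCharsSingle (c : Char) (h : pvDomChar c = true) :
    PySem.Int.ofChars? [c] =
      (if PySem.Chars.isdigit c then some ((c.toNat : Int) - 48) else none) := by
  have hlt : c.toNat < 128 := by
    simp only [pvDomChar, Bool.or_eq_true, Bool.and_eq_true, decide_eq_true_eq,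
      beq_iff_eq] at h
    omega
  have := pvOfCharsSingle_ofNat c.toNat hlt
  rwa [Char.ofNat_toNat c] at this

-- an ASCII digit char is one of the ten digit symbols
theorem pvDigitMem_ofNat : ∀ n : Nat, n < 128 →
    PySem.Chars.isdigit (Char.ofNat n) = true → Char.ofNat n ∈ "0123456789".toList := by
  decide

theorem pvDigitMem (c : Char) (h : pvDomChar c = true)
    (hd : PySem.Chars.isdigit c = true) : c ∈ "0123456789".toList := by
  have hlt : c.toNat < 128 := by
    simp only [pvDomChar, Bool.or_eq_true, Bool.and_eq_true, decide_eq_true_eq,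
      beq_iff_eq] at h
    omega
  have := pvDigitMem_ofNat c.toNat hlt
  rw [Char.ofNat_toNat c] at this
  exact this hd

-- loop invariant: with k = 100 - passed digits still wanted (0 < k ≤ 100),
-- A's loop adds the values of the first k digit chars of the remaining input
theorem pvLoopA_eq (cs : List Char) : ∀ (summ : Int) (k : Nat),
    (∀ c ∈ cs, pvDomChar c = true) → 0 < k → k ≤ 100 →
    pvLoopA cs summ (100 - (k : Int)) =
      summ + (((cs.filter PySem.Chars.isdigit).take k).map
        (fun c => (PySem.Int.ofChars? [c]).getD 0)).sum := by
  induction cs with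
  | nil => intro summ k _ _ _; simp [pvLoopA]
  | cons c rest ih =>
    intro summ k hdom hk hk100
    have hc := pvOfCharsSingle c (hdom c (List.mem_cons_self ..))
    have hrest : ∀ x ∈ rest, pvDomChar x = true :=
      fun x hx => hdom x (List.mem_cons_of_mem _ hx)
    by_cases hd : PySem.Chars.isdigit c = true
    · rw [hd, if_pos rfl] at hc
      by_cases h1 : k = 1
      · subst h1
        simp [pvLoopA, hc, hd]
      · have hk2 : 2 ≤ k := by omega
        have hstep : (100 : Int) - (k : Int) + 1 = 100 - ((k - 1 : Nat) : Int) := by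
          push_cast [Nat.cast_sub (by omega : 1 ≤ k)]; ring
        obtain ⟨k', rfl⟩ : ∃ k', k = k' + 1 := ⟨k - 1, by omega⟩
        simp only [pvLoopA, hc, hstep]
        rw [ih (summ + ((c.toNat : Int) - 48)) (k' + 1 - 1) hrest (by omega) (by omega)]
        simp [hd, hc, List.take_succ_cons]
        split_ifs with h0 <;> [omega; ring]
    · rw [Bool.not_eq_true] at hd
      rw [hd, if_neg (by simp)] at hc
      simp only [pvLoopA, hc]
      rw [ih summ k hrest hk hk100]
      simp [hd]

theorem pvSlice_take (xs : List Char) :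
    PySem.List.slice xs none (some 100) = xs.take 100 := by
  rw [PySem.List.slice_to xs (by norm_num : (0:Int) ≤ 100)]; rfl

-- Python's s.count(d) for a one-char needle is List.count
theorem pvCountGo_singleton (c : Char) : ∀ (l : List Char) (acc fuel : Nat),
    l.length ≤ fuel → PySem.Chars.count.go [c] fuel l acc = acc + l.count c := by
  intro l
  induction l with
  | nil => intro acc fuel _; cases fuel <;> simp [PySem.Chars.count.go]
  | cons h t ih =>
    intro acc fuel hfuel
    match fuel with
    | 0 => simp at hfuel
    | fuel + 1 =>
      rw [PySem.Chars.count.go]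
      by_cases hch : c = h
      · subst hch
        have hp : List.isPrefixOf [c] (c :: t) = true := by simp [List.isPrefixOf]
        rw [if_pos hp]
        simp only [List.length, List.drop_succ_cons, List.drop_zero] at *
        rw [ih (acc + 1) fuel (by omega)]
        simp
        omega
      · have hp : List.isPrefixOf [c] (h :: t) = false := by
          simp [List.isPrefixOf, hch]
        rw [if_neg (by simp [hp])]
        simp only [List.length] at hfuel
        rw [ih acc fuel (by omega)]
        simp [List.count_cons]
        intro h'; exact absurd h'.symm hch

theorem pvCount_singleton (l : List Char) (c : Char) :
    PySem.Chars.count l [c] = l.count c := by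
  have := pvCountGo_singleton c l 0 l.length le_rfl
  simpa [PySem.Chars.count] using this

-- dot-product with counts over a nodup universe equals the direct map-sum
theorem pvSumIte_not_mem (f : Char → Int) (c : Char) : ∀ (D : List Char), c ∉ D →
    (D.map (fun d => f d * (if d == c then (1:Int) else 0))).sum = 0 := by
  intro D
  induction D with
  | nil => simp
  | cons d rest ih =>
    intro h
    have hne : d ≠ c := fun he => h (he ▸ List.mem_cons_self ..)
    simp only [List.map_cons, List.sum_cons]
    rw [if_neg (by simp [hne]), mul_zero, zero_add]
    exact ih (fun hm => h (List.mem_cons_of_mem _ hm))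

theorem pvSumIte_mem (f : Char → Int) (c : Char) : ∀ (D : List Char), D.Nodup → c ∈ D →
    (D.map (fun d => f d * (if d == c then (1:Int) else 0))).sum = f c := by
  intro D
  induction D with
  | nil => simp
  | cons d rest ih =>
    intro hnd hmem
    rcases List.mem_cons.mp hmem with he | hm
    · subst he
      simp only [List.map_cons, List.sum_cons]
      rw [if_pos (by simp), mul_one,
        pvSumIte_not_mem f c rest (List.nodup_cons.mp hnd).1, add_zero]
    · have hne : d ≠ c := fun he => (List.nodup_cons.mp hnd).1 (he ▸ hm)
      simp only [List.map_cons, List.sum_cons]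
      rw [if_neg (by simp [hne]), mul_zero, zero_add]
      exact ih (List.nodup_cons.mp hnd).2 hm

theorem pvHist (f : Char → Int) (D : List Char) (hD : D.Nodup) :
    ∀ (xs : List Char), (∀ c ∈ xs, c ∈ D) →
    (D.map (fun d => f d * (xs.count d : Int))).sum = (xs.map f).sum := by
  intro xs
  induction xs with
  | nil => intro _; simp
  | cons c rest ih =>
    intro hxs
    have hpt : D.map (fun d => f d * (((c :: rest).count d : Nat) : Int)) =
        D.map (fun d => f d * (rest.count d : Int) + f d * (if d == c then (1:Int) else 0)) := by
      apply List.map_congr_left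
      intro d _
      by_cases h : d = c
      · subst h; simp only [List.count_cons, BEq.refl, if_true]; push_cast; ring
      · rw [List.count_cons, if_neg (by simp [Ne.symm h]), if_neg (by simp [h])]
        push_cast; ring
    have hsplit :
        (D.map (fun d => f d * (((c :: rest).count d : Nat) : Int))).sum =
        (D.map (fun d => f d * (rest.count d : Int))).sum +
        (D.map (fun d => f d * (if d == c then (1:Int) else 0))).sum := by
      rw [hpt, PySem.List.sum_map_add_int]
    rw [hsplit, ih (fun x hx => hxs x (List.mem_cons_of_mem _ hx)),
      pvSumIte_mem f c D hD (hxs c (List.mem_cons_self ..))]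
    simp [add_comm]

-- ===== VERDICT (by name: the statement is the Claim_ definition above) =====
theorem sum_first_100_digits_spec : Claim_equal_sum_first_100_digits := by
  intro num hdom
  unfold Spec_sum_first_100_digits sum_first_100_digits sum_first_100_digits_alt
  have hall : ∀ c ∈ num.toList, pvDomChar c = true := by
    simpa [Dom_sum_first_100_digits, pvDomStr, List.all_eq_true] using hdom
  have hA := pvLoopA_eq num.toList 0 100 hall (by omega) (by omega)
  simp only [Nat.cast_ofNat, sub_self] at hA
  rw [hA, pvSlice_take]
  simp only [pvCount_singleton]
  rw [pvHist (fun c => (PySem.Int.ofChars? [c]).getD 0) "0123456789".toList (by decide)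
    ((num.toList.filter PySem.Chars.isdigit).take 100)
    (fun c hc => pvDigitMem c
      (hall c (List.mem_of_mem_filter (List.mem_of_mem_take hc)))
      (List.of_mem_filter (List.mem_of_mem_take hc)))]
  simp
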